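-- pv_equiv track=rewrite | github.com/derivadiv/advent2020 | day06/day6.py | unanimous_chars
-- ===== SOURCE A (Python) =====
-- def unanimous_chars(group_members):
--     agreedchars = set(group_members[0])
--     for member in group_members[1:]:
--         shared = set()
--         for c in member:
--             if c in agreedchars:
--                 shared.add(c)
--         agreedchars = shared
--     return agreedchars
-- ===== SOURCE B (Python) =====
-- def unanimous_chars(group_members):
--     n = len(group_members)
--     counts = {}
--     for member in group_members:
--         for c in set(member):
--             counts[c] = counts.get(c, 0) + 1
--     return {c for c in set(group_members[-1]) if counts.get(c, 0) == n}
-- ===== Notes on version B (the rewrite author's own statement) =====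
-- stated objective: alternative
-- what changed: Replaces A's chain of successive set intersections (a fresh shrinking 'shared' set rebuilt per member) with one counting pass that tallies, in a plain dict, how many members contain each character, then filters the last member's character set for count == len(group_members).
import Mathlib
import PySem

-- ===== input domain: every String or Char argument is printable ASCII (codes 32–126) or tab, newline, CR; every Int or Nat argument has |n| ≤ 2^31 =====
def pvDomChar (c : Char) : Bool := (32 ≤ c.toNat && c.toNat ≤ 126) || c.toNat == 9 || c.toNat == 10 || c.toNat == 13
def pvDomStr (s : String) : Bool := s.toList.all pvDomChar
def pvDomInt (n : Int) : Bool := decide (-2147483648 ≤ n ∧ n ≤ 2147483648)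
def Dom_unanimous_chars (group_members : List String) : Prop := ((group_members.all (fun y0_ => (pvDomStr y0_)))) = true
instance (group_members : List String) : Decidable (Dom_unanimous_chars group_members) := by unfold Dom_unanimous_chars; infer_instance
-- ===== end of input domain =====

-- B replaces A's chain of successive set intersections with one counting pass (how many
-- members contain each character) plus a filter of the last member's character set
-- (objective: alternative structure, similar cost).

-- ===== PORT A =====
-- 'shared = set(); for c in member: if c in agreedchars: shared.add(c)'
def uaShared (agreed : PySem.Set Char) (m : List Char) : PySem.Set Char :=
  m.foldl (fun s c => if PySem.Set.contains agreed c then PySem.Set.add s c else s)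
    PySem.Set.empty

-- 'for member in group_members[1:]: … agreedchars = shared'
def uaLoop (agreed : PySem.Set Char) (rest : List String) : PySem.Set Char :=
  match rest with
  | [] => agreed
  | m :: rest => uaLoop (uaShared agreed m.toList) rest

def unanimous_chars (group_members : List String) : List String :=
  match group_members with
  | [] => []  -- Python raises IndexError on group_members[0]; excluded by Pre_
  | h :: t =>
    -- agreedchars = set(group_members[0]); loop over group_members[1:] = t
    (uaLoop (PySem.Set.ofList h.toList) t).map (fun c => String.ofList [c])

-- ===== PORT B =====
-- 'counts = {}; for member in group_members: for c in set(member): counts[c] = counts.get(c, 0) + 1'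
def ubCounts (group_members : List String) : PySem.Dict Char Int :=
  group_members.foldl
    (fun d m => (PySem.Set.ofList m.toList).foldl (fun d c => d.insert c (d.getD c 0 + 1)) d)
    PySem.Dict.empty

def unanimous_chars_alt (group_members : List String) : List String :=
  match group_members with
  | [] => []  -- Python raises IndexError on group_members[-1]; excluded by Pre_
  | h :: t =>
    let n : Int := (h :: t).length
    let counts := ubCounts (h :: t)
    let lastm := (h :: t).getLast (List.cons_ne_nil h t)  -- group_members[-1]
    -- '{c for c in set(group_members[-1]) if counts.get(c, 0) == n}'
    ((PySem.Set.ofList lastm.toList).filter (fun c => counts.getD c 0 == n)).map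
      (fun c => String.ofList [c])

-- ===== PRECONDITION & SPEC =====
-- Pre_ excludes only the empty list, on which both A and B raise IndexError.
def Pre_unanimous_chars (group_members : List String) : Prop := group_members ≠ []
instance (group_members : List String) : Decidable (Pre_unanimous_chars group_members) := by
  unfold Pre_unanimous_chars; infer_instance

def pvWitness_unanimous_chars : List String := ["abc", "cab"]

def Spec_unanimous_chars (group_members : List String) (out : List String) : Prop := out = unanimous_chars_alt group_members
instance (group_members : List String) (out : List String) : Decidable (Spec_unanimous_chars group_members out) := by unfold Spec_unanimous_chars; infer_instance

-- ===== CLAIM (what is proved, stated in full; the proofs are below) =====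
def Claim_equal_unanimous_chars : Prop := ∀ (group_members : List String), Dom_unanimous_chars group_members → Pre_unanimous_chars group_members → Spec_unanimous_chars group_members (unanimous_chars group_members)

-- ===== LEMMAS AND PROOFS =====

-- adding to a set then filtering = filtering then conditionally adding
lemma add_filter (q : Char → Bool) (s : PySem.Set Char) (c : Char) :
    (PySem.Set.add s c).filter q =
      if q c then PySem.Set.add (s.filter q) c else s.filter q := by
  simp only [PySem.Set.add, PySem.Set.contains]
  by_cases hc : c ∈ s
  · simp [hc]
  · by_cases hq : q c <;> simp [hc, hq]

-- a fold of Set.add commutes with filter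
lemma foldl_add_filter (q : Char → Bool) (l : List Char) (s : PySem.Set Char) :
    (l.foldl PySem.Set.add s).filter q = (l.filter q).foldl PySem.Set.add (s.filter q) := by
  induction l generalizing s with
  | nil => rfl
  | cons c l ih =>
    simp only [List.foldl_cons, List.filter_cons]
    rw [ih, add_filter]
    by_cases hq : q c <;> simp [hq]

lemma ofList_filter (q : Char → Bool) (l : List Char) :
    PySem.Set.ofList (l.filter q) = (PySem.Set.ofList l).filter q := by
  rw [PySem.Set.ofList_eq_foldl, PySem.Set.ofList_eq_foldl, foldl_add_filter]
  rfl

-- A's inner loop builds set(member) filtered by membership in agreedchars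
lemma uaShared_eq (agreed : PySem.Set Char) (m : List Char) :
    uaShared agreed m = (PySem.Set.ofList m).filter (fun c => PySem.Set.contains agreed c) := by
  unfold uaShared
  show List.foldl _ ([] : PySem.Set Char) m = _
  rw [PySem.List.foldl_if_eq_foldl_filter (fun c => PySem.Set.contains agreed c) PySem.Set.add,
    ← PySem.Set.ofList_eq_foldl, ofList_filter]

lemma mem_uaShared (agreed : PySem.Set Char) (m : List Char) (c : Char) :
    c ∈ uaShared agreed m ↔ c ∈ m ∧ c ∈ agreed := by
  rw [uaShared_eq]
  simp [List.mem_filter, PySem.Set.mem_ofList, PySem.Set.contains]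

-- A's outer loop: the last member's character set, filtered by membership in the
-- initial agreed set and in every member before the last
lemma uaLoop_eq (rest : List String) (agreed : PySem.Set Char) (h : rest ≠ []) :
    uaLoop agreed rest =
      (PySem.Set.ofList (rest.getLast h).toList).filter
        (fun c => PySem.Set.contains agreed c &&
          rest.dropLast.all (fun m => m.toList.contains c)) := by
  induction rest generalizing agreed with
  | nil => exact absurd rfl h
  | cons m rest ih =>
    by_cases hr : rest = []
    · subst hr
      simp only [uaLoop, uaShared_eq]
      simp
    · simp only [uaLoop]
      rw [ih (uaShared agreed m.toList) hr]
      rw [List.getLast_cons hr]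
      have hd : (m :: rest).dropLast = m :: rest.dropLast := by
        simp [List.dropLast_cons_of_ne_nil hr]
      rw [hd]
      apply List.filter_congr
      intro c _
      simp only [List.all_cons, PySem.Set.contains, List.contains_eq_mem]
      have : (decide (c ∈ uaShared agreed m.toList)) = (decide (c ∈ m.toList) && decide (c ∈ agreed)) := by
        by_cases h1 : c ∈ m.toList <;> by_cases h2 : c ∈ agreed <;>
          simp [mem_uaShared, h1, h2]
      rw [this]
      cases decide (c ∈ m.toList) <;> cases decide (c ∈ agreed) <;> simp

lemma ubCounts_aux (group_members : List String) (d : PySem.Dict Char Int) (c : Char) :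
    (group_members.foldl
      (fun d m => (PySem.Set.ofList m.toList).foldl (fun d c => d.insert c (d.getD c 0 + 1)) d)
      d).getD c 0 =
      d.getD c 0 + (group_members.countP (fun m => m.toList.contains c) : Int) := by
  induction group_members generalizing d with
  | nil => simp
  | cons m t ih =>
    simp only [List.foldl_cons, List.countP_cons]
    rw [ih, PySem.Dict.getD_foldl_insert_add_one]
    have : (List.count c (PySem.Set.ofList m.toList) : Int) =
        (if m.toList.contains c = true then 1 else 0 : Nat) := by
      by_cases hm : c ∈ m.toList
      · simp [List.contains_eq_mem, hm]
      · simp [List.count_eq_zero.2 (fun h => hm ((PySem.Set.mem_ofList m.toList c).1 h)),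
          List.contains_eq_mem, hm]
    rw [this]
    push_cast
    by_cases hm : m.toList.contains c = true
    · rw [if_pos hm]; ring
    · rw [if_neg hm]; ring

-- B's dict holds, for each character, the number of members containing it
lemma ubCounts_getD (group_members : List String) (c : Char) :
    (ubCounts group_members).getD c 0 =
      (group_members.countP (fun m => m.toList.contains c) : Int) := by
  unfold ubCounts
  rw [ubCounts_aux]
  simp [PySem.Dict.getD_empty]

-- ===== VERDICT (by name: the statement is the Claim_ definition above) =====
theorem unanimous_chars_spec : Claim_equal_unanimous_chars := by
  intro gm _ hpre
  unfold Spec_unanimous_chars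
  match gm with
  | [] => exact absurd rfl hpre
  | h :: t =>
    simp only [unanimous_chars, unanimous_chars_alt]
    congr 1
    by_cases hr : t = []
    · subst hr
      simp only [uaLoop, List.getLast_singleton]
      rw [Eq.comm]
      apply List.filter_eq_self.2
      intro c hc
      rw [ubCounts_getD]
      have : c ∈ h.toList := (PySem.Set.mem_ofList h.toList c).1 hc
      simp [List.contains_eq_mem, this]
    · rw [uaLoop_eq t _ hr, List.getLast_cons hr]
      apply List.filter_congr
      intro c hcmem
      have hc : c ∈ (t.getLast hr).toList := (PySem.Set.mem_ofList _ _).1 hcmem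
      rw [ubCounts_getD, Bool.eq_iff_iff]
      simp only [Bool.and_eq_true, List.all_eq_true, beq_iff_eq, List.contains_eq_mem,
        decide_eq_true_eq, PySem.Set.contains, PySem.Set.mem_ofList, Nat.cast_inj]
      rw [List.countP_eq_length]
      constructor
      · rintro ⟨h1, h2⟩
        intro m hm
        rcases List.mem_cons.1 hm with rfl | hmt
        · simpa [List.contains_eq_mem] using h1
        · rcases (by rw [← List.dropLast_append_getLast hr] at hmt; exact List.mem_append.1 hmt) with hmd | hml
          · simpa [List.contains_eq_mem] using h2 m hmd
          · have : m = t.getLast hr := by simpa using hml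
            subst this
            simp [hc]
      · intro hall
        constructor
        · simpa [List.contains_eq_mem] using hall h (List.mem_cons_self)
        · intro m hmd
          have : m ∈ t := by
            rw [← List.dropLast_append_getLast hr]
            exact List.mem_append.2 (Or.inl hmd)
          simpa [List.contains_eq_mem] using hall m (List.mem_cons.2 (Or.inr this))
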